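-- pv_equiv track=rewrite | github.com/PennyS8/Chomsky-Conversion | src/helper.py | product_to_list
-- ===== SOURCE A (Python) =====
-- def product_to_list(product):
--     """
--     splits up the product by its variables/terminals and returns the list
--
--     Args:
--         product (string): string of an element contained in RHS of particular rule
--     """
--
--     element_list = []
--     current_element = ""
--
--     # spilt up by start of each element is a letter
--     for char in product:
--         if char.isalpha():
--             if current_element:
--                 element_list.append(current_element)
--             current_element = char
--         else:
--             current_element += char
--
--     # append the last element if the string ends with a symbol
--     if current_element:
--         element_list.append(current_element)
--
--     return element_list
-- ===== SOURCE B (Python) =====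
-- def product_to_list(product):
--     """Peels off one whole element per outer iteration: scan ahead to the
--     next letter (every element starts with a letter, except a letterless
--     leading prefix), slice it off, repeat on the remainder."""
--     elements = []
--     rest = product
--     while rest:
--         i = 1
--         while i < len(rest) and not rest[i].isalpha():
--             i += 1
--         elements.append(rest[:i])
--         rest = rest[i:]
--     return elements
-- ===== Notes on version B (the rewrite author's own statement) =====
-- stated objective: alternative
-- what changed: B peels off one whole element per outer iteration by scanning forward to the next letter and slicing, instead of A's single char-by-char fold that grows a current-element accumulator and flushes it when a letter begins.
import Mathlib
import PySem

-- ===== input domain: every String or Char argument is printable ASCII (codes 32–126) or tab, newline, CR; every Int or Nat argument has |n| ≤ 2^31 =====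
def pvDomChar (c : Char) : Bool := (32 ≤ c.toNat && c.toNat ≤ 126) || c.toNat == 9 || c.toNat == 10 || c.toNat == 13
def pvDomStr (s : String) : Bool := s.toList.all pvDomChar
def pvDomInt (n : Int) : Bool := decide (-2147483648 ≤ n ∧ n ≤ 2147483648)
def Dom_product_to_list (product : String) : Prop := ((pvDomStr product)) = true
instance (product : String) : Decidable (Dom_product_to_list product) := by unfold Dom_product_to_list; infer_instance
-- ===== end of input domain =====

-- B peels off one whole element per outer step (scan to next letter, slice) instead of A's char fold with an accumulator; return values proved equal.

-- ===== PORT A =====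
-- A's loop state: (element_list, current_element), elements kept as List Char.
def pvStepA (st : List (List Char) × List Char) (c : Char) : List (List Char) × List Char :=
  if PySem.Chars.isalpha c then
    (if st.2 ≠ [] then st.1 ++ [st.2] else st.1, [c])
  else
    (st.1, st.2 ++ [c])

def product_to_list (product : String) : List String :=
  let st := product.toList.foldl pvStepA ([], [])
  (if st.2 ≠ [] then st.1 ++ [st.2] else st.1).map String.ofList

-- ===== PORT B =====
-- B's outer while loop: one recursive call per element; the inner index scan
-- 'i = 1; while i < len(rest) and not rest[i].isalpha(): i += 1' plus the two
-- slices rest[:i] / rest[i:] is exactly takeWhile/dropWhile of (¬ isalpha) on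
-- the tail, with the head char prepended to the taken part.
def pvPeel (l : List Char) : List (List Char) :=
  match l with
  | [] => []
  | c :: t =>
    (c :: t.takeWhile (fun x => !PySem.Chars.isalpha x)) ::
      pvPeel (t.dropWhile (fun x => !PySem.Chars.isalpha x))
termination_by l.length
decreasing_by
  simpa using Nat.lt_succ_of_le (t.length_dropWhile_le _)

def product_to_list_alt (product : String) : List String :=
  (pvPeel product.toList).map String.ofList

-- ===== PRECONDITION & SPEC =====
def Spec_product_to_list (product : String) (out : List String) : Prop := out = product_to_list_alt product
instance (product : String) (out : List String) : Decidable (Spec_product_to_list product out) := by unfold Spec_product_to_list; infer_instance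

-- ===== CLAIM (what is proved, stated in full; the proofs are below) =====
def Claim_equal_product_to_list : Prop := ∀ (product : String), Dom_product_to_list product → Spec_product_to_list product (product_to_list product)

-- ===== LEMMAS AND PROOFS =====
-- equation lemmas for the well-founded pvPeel
lemma pvPeel_nil : pvPeel [] = [] := by rw [pvPeel.eq_def]

lemma pvPeel_cons (c : Char) (t : List Char) :
    pvPeel (c :: t) =
      (c :: t.takeWhile (fun x => !PySem.Chars.isalpha x)) ::
        pvPeel (t.dropWhile (fun x => !PySem.Chars.isalpha x)) := by rw [pvPeel.eq_def]

-- the shared finalization step ("append the last element if nonempty")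
def pvFin (st : List (List Char) × List Char) : List (List Char) :=
  if st.2 ≠ [] then st.1 ++ [st.2] else st.1

lemma pvRunA_shift (l : List Char) : ∀ (E : List (List Char)) (C : List Char),
    pvFin (l.foldl pvStepA (E, C)) = E ++ pvFin (l.foldl pvStepA ([], C)) := by
  induction l with
  | nil =>
    intro E C
    simp only [List.foldl_nil, pvFin]
    by_cases h : C = [] <;> simp [h]
  | cons c t ih =>
    intro E C
    simp only [List.foldl_cons, pvStepA, List.nil_append]
    split_ifs with ha hC
    · rw [ih (E ++ [C]) [c], ih [C] [c]]
      simp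
    · exact ih E [c]
    · rw [ih E (C ++ [c])]

-- A's fold, run with a nonempty pending element C, produces C extended by the
-- letterless prefix, then B's peeling of the remainder.
lemma pvKey (t : List Char) : ∀ (C : List Char), C ≠ [] →
    pvFin (t.foldl pvStepA ([], C)) =
      (C ++ t.takeWhile (fun x => !PySem.Chars.isalpha x)) ::
        pvPeel (t.dropWhile (fun x => !PySem.Chars.isalpha x)) := by
  induction t with
  | nil =>
    intro C hC
    simp [pvFin, pvPeel_nil, hC]
  | cons c t ih =>
    intro C hC
    simp only [List.foldl_cons, pvStepA, List.nil_append]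
    by_cases ha : PySem.Chars.isalpha c
    · simp only [ha, hC, ne_eq, not_false_eq_true, if_pos]
      rw [pvRunA_shift t [C] [c], ih [c] (by simp)]
      simp [ha, pvPeel_cons]
    · simp only [ha, Bool.false_eq_true, not_false_eq_true, if_neg]
      rw [ih (C ++ [c]) (by simp)]
      simp [ha]

lemma pvAB (l : List Char) : pvFin (l.foldl pvStepA ([], [])) = pvPeel l := by
  cases l with
  | nil => simp [pvFin, pvPeel_nil]
  | cons c t =>
    simp only [List.foldl_cons, pvStepA, List.nil_append]
    have h : (if PySem.Chars.isalpha c = true then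
        ((if ([] : List Char) ≠ [] then [([] : List Char)] else []), [c])
      else (([] : List (List Char)), [c])) = (([] : List (List Char)), [c]) := by
      split_ifs <;> simp_all
    rw [h, pvKey t [c] (by simp), pvPeel_cons]
    simp

-- ===== VERDICT (by name: the statement is the Claim_ definition above) =====
theorem product_to_list_spec : Claim_equal_product_to_list := by
  intro product _
  show List.map String.ofList (pvFin (product.toList.foldl pvStepA ([], []))) =
    List.map String.ofList (pvPeel product.toList)
  rw [pvAB]
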